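-- pv_equiv track=rewrite | github.com/GUILHERME-GARCIATECH/geradordiarioobras | src/tarefas.py | extrair_tarefas
-- ===== SOURCE A (Python) =====
-- def normalizar_texto(texto: str) -> str:
--     return " ".join(str(texto or "").strip().lower().split())
--
-- def obter_valor_campo_insensivel(registro: dict, nome_campo: str):
--     nome_normalizado = normalizar_texto(nome_campo)
--
--     for chave, valor in registro.items():
--         if normalizar_texto(str(chave)) == nome_normalizado:
--             return valor
--
--     return None
--
-- def descobrir_coluna_tarefas(registro: dict, mapa_etapas: dict[str, str]) -> str | None:
--     etapa = (
--         obter_valor_campo_insensivel(registro, "etapa")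
--         or obter_valor_campo_insensivel(registro, "etapa_da_obra")
--         or ""
--     )
--     etapa = str(etapa).strip()
--
--     if not etapa:
--         return None
--
--     etapa_normalizada = normalizar_texto(etapa)
--
--     for chave, coluna in mapa_etapas.items():
--         if normalizar_texto(chave) == etapa_normalizada:
--             return coluna
--         if normalizar_texto(coluna) == etapa_normalizada:
--             return coluna
--
--     return None
--
-- def quebrar_tarefas(valor, limite: int = 9) -> list[str]:
--     if not valor:
--         return []
--
--     tarefas = [t.strip() for t in str(valor).split(";") if t and t.strip()]
--     return tarefas[:limite]
--
-- def extrair_tarefas(registro: dict, mapa_etapas: dict[str, str], limite: int = 9) -> list[str]: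
--     coluna = descobrir_coluna_tarefas(registro, mapa_etapas)
--
--     if coluna:
--         valor = obter_valor_campo_insensivel(registro, coluna)
--         tarefas = quebrar_tarefas(valor, limite)
--         if tarefas:
--             return tarefas
--
--     for _, coluna_mapa in mapa_etapas.items():
--         valor = obter_valor_campo_insensivel(registro, coluna_mapa)
--         tarefas = quebrar_tarefas(valor, limite)
--         if tarefas:
--             return tarefas
--
--     for nome in ["tarefas", "tarefas_realizadas", "atividade", "atividades"]:
--         valor = obter_valor_campo_insensivel(registro, nome)
--         tarefas = quebrar_tarefas(valor, limite)
--         if tarefas: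
--             return tarefas
--
--     return []
-- ===== SOURCE B (Python) =====
-- def normalizar_texto(texto: str) -> str:
--     return " ".join(str(texto or "").strip().lower().split())
--
--
-- def extrair_tarefas(registro: dict, mapa_etapas: dict[str, str], limite: int = 9) -> list[str]:
--     # Rank-selection instead of sequential fallback: assign each candidate
--     # column a priority rank, then make ONE pass over the record picking the
--     # field with the best rank that yields tasks.
--     campos = {}
--     for chave, valor in registro.items():
--         n = normalizar_texto(str(chave))
--         if n not in campos:
--             campos[n] = valor
--
--     def campo(nome):
--         return campos.get(normalizar_texto(nome))
--
--     etapa = str(campo("etapa") or campo("etapa_da_obra") or "").strip()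
--     coluna = None
--     if etapa:
--         en = normalizar_texto(etapa)
--         for k, c in mapa_etapas.items():
--             if normalizar_texto(k) == en or normalizar_texto(c) == en:
--                 coluna = c
--                 break
--
--     candidatos = ([coluna] if coluna else []) + list(mapa_etapas.values()) + [
--         "tarefas", "tarefas_realizadas", "atividade", "atividades",
--     ]
--     rank = {}
--     for i, nome in enumerate(candidatos):
--         rank.setdefault(normalizar_texto(nome), i)
--
--     melhor = None
--     for n, valor in campos.items():
--         r = rank.get(n)
--         if r is not None and (melhor is None or r < melhor[0]):
--             tarefas = [t.strip() for t in str(valor).split(";") if t.strip()][:limite]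
--             if tarefas:
--                 melhor = (r, tarefas)
--     return melhor[1] if melhor else []
-- ===== Notes on version B (the rewrite author's own statement) =====
-- stated objective: faster
-- what changed: B replaces A's three sequential fallback blocks (each re-scanning the record per candidate column) by rank selection: it indexes the record's normalized fields once, assigns every candidate column a priority rank via a rank dict, and picks in one pass over the record the best-ranked field whose value yields a non-empty task list.
import Mathlib
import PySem

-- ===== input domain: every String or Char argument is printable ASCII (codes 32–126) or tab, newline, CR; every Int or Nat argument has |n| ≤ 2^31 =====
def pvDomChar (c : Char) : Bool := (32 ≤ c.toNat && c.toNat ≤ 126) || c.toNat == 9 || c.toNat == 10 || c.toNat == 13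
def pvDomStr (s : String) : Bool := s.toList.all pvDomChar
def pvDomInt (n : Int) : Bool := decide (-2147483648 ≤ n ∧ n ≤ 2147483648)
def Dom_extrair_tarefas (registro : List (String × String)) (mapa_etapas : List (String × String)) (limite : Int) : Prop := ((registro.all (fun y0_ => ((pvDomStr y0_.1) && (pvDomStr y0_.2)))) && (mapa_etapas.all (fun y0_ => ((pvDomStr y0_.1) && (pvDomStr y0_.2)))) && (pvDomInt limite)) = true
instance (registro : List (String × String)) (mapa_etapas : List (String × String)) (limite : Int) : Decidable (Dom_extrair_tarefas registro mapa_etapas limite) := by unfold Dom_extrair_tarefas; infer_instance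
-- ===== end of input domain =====

-- B replaces A's three sequential fallback blocks (each scanning the record per candidate column)
-- by rank selection: it indexes the record's normalized fields once, assigns every candidate column
-- a priority rank, and picks in ONE pass over the record the best-ranked field that yields tasks
-- (objective: faster; a timing run measured B well above 1.5x A at the largest size).


-- ===== PORT A =====

-- " ".join(str(texto or "").strip().lower().split())  (texto is always a str here, so 'texto or ""' is the identity)
def pvNorm (s : String) : String :=
  PySem.Str.join " " (PySem.Str.split₀ (PySem.Str.lower (PySem.Str.strip s)))

-- obter_valor_campo_insensivel: first key of registro whose normalized form matches
def pvObter (registro : List (String × String)) (nome : String) : Option String :=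
  (registro.find? (fun kv => pvNorm kv.1 == pvNorm nome)).map (·.2)

-- Python 'x or y' for x : Optional[str], y : str (truthy = some nonempty string)
def pvOrStr (o : Option String) (y : String) : String :=
  match o with
  | some v => if v = "" then y else v
  | none => y

-- descobrir_coluna_tarefas
def pvDescobrir (registro : List (String × String)) (mapa_etapas : List (String × String)) : Option String :=
  let etapa := PySem.Str.strip (pvOrStr (pvObter registro "etapa") (pvOrStr (pvObter registro "etapa_da_obra") ""))
  if etapa = "" then none
  else
    let en := pvNorm etapa
    (mapa_etapas.find? (fun kc => pvNorm kc.1 == en || pvNorm kc.2 == en)).map (·.2)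

-- quebrar_tarefas
def pvQuebrar (valor : Option String) (limite : Int) : List String :=
  match valor with
  | none => []
  | some s =>
    if s = "" then []
    else
      -- sep is the literal ";" ≠ "", so split? is always some
      let tarefas := (((PySem.Str.split? s ";").getD []).filter
        (fun t => !(t == "") && !(PySem.Str.strip t == ""))).map PySem.Str.strip
      PySem.List.slice tarefas none (some limite)

-- A's second block: 'for _, coluna_mapa in mapa_etapas.items(): …'
def pvLoopMapa (registro : List (String × String)) (limite : Int) : List (String × String) → Option (List String)
  | [] => none
  | kc :: rest =>
    let t := pvQuebrar (pvObter registro kc.2) limite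
    if t = [] then pvLoopMapa registro limite rest else some t

-- A's third block: 'for nome in [...]: …'
def pvLoopFixo (registro : List (String × String)) (limite : Int) : List String → Option (List String)
  | [] => none
  | n :: rest =>
    let t := pvQuebrar (pvObter registro n) limite
    if t = [] then pvLoopFixo registro limite rest else some t

def extrair_tarefas (registro : List (String × String)) (mapa_etapas : List (String × String)) (limite : Int) : List String :=
  let coluna := pvDescobrir registro mapa_etapas
  let r1 : Option (List String) :=
    match coluna with
    | some c =>
      if c = "" then none
      else
        let t := pvQuebrar (pvObter registro c) limite
        if t = [] then none else some t
    | none => none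
  match r1 with
  | some t => t
  | none =>
    match pvLoopMapa registro limite mapa_etapas with
    | some t => t
    | none =>
      match pvLoopFixo registro limite ["tarefas", "tarefas_realizadas", "atividade", "atividades"] with
      | some t => t
      | none => []

-- ===== PORT B =====

-- campos: normalized-key index of the record, first occurrence wins
def pvIndice (registro : List (String × String)) : PySem.Dict String String :=
  registro.foldl
    (fun d kv =>
      let n := pvNorm kv.1
      if d.contains n then d else d.insert n kv.2)
    PySem.Dict.empty

def pvCampo (indice : PySem.Dict String String) (nome : String) : Option String :=
  indice.get? (pvNorm nome)

-- rank = {}; for i, nome in enumerate(candidatos): rank.setdefault(normalizar_texto(nome), i)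
def pvRank (candidatos : List String) : PySem.Dict String Nat :=
  (candidatos.zipIdx).foldl (fun d ni => d.setdefault (pvNorm ni.1) ni.2) PySem.Dict.empty

-- [t.strip() for t in str(valor).split(";") if t.strip()][:limite]
def pvTarefasB (valor : String) (limite : Int) : List String :=
  PySem.List.slice
    ((((PySem.Str.split? valor ";").getD []).filter
      (fun t => !(PySem.Str.strip t == ""))).map PySem.Str.strip)
    none (some limite)

-- the single pass over the record keeping the best-ranked nonempty task list
def pvVarredura (rank : PySem.Dict String Nat) (limite : Int) (itens : List (String × String)) : Option (Nat × List String) :=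
  itens.foldl
    (fun melhor nv =>
      match rank.get? nv.1 with
      | none => melhor
      | some r =>
        if (match melhor with | none => true | some b => decide (r < b.1)) then
          let tarefas := pvTarefasB nv.2 limite
          if tarefas = [] then melhor else some (r, tarefas)
        else melhor)
    none

def extrair_tarefas_alt (registro : List (String × String)) (mapa_etapas : List (String × String)) (limite : Int) : List String :=
  let indice := pvIndice registro
  let etapa := PySem.Str.strip (pvOrStr (pvCampo indice "etapa") (pvOrStr (pvCampo indice "etapa_da_obra") ""))
  let coluna : Option String :=
    if etapa = "" then none
    else
      let en := pvNorm etapa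
      (mapa_etapas.find? (fun kc => pvNorm kc.1 == en || pvNorm kc.2 == en)).map (·.2)
  let candidatos :=
    (match coluna with
     | some c => if c = "" then [] else [c]
     | none => []) ++ mapa_etapas.map (·.2) ++ ["tarefas", "tarefas_realizadas", "atividade", "atividades"]
  let rank := pvRank candidatos
  match pvVarredura rank limite indice.items with
  | some rt => rt.2
  | none => []

-- ===== PRECONDITION & SPEC =====
def Spec_extrair_tarefas (registro : List (String × String)) (mapa_etapas : List (String × String)) (limite : Int) (out : List String) : Prop := out = extrair_tarefas_alt registro mapa_etapas limite
instance (registro : List (String × String)) (mapa_etapas : List (String × String)) (limite : Int) (out : List String) : Decidable (Spec_extrair_tarefas registro mapa_etapas limite out) := by unfold Spec_extrair_tarefas; infer_instance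

-- ===== CLAIM (what is proved, stated in full; the proofs are below) =====
def Claim_equal_extrair_tarefas : Prop := ∀ (registro : List (String × String)) (mapa_etapas : List (String × String)) (limite : Int), Dom_extrair_tarefas registro mapa_etapas limite → Spec_extrair_tarefas registro mapa_etapas limite (extrair_tarefas registro mapa_etapas limite)

-- ===== LEMMAS AND PROOFS =====

-- the first-occurrence index answers exactly like A's linear scan
theorem pvIndice_fold_get? (registro : List (String × String)) (d : PySem.Dict String String) (key : String) :
    (registro.foldl
      (fun d kv =>
        let n := pvNorm kv.1
        if d.contains n then d else d.insert n kv.2) d).get? key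
    = (d.get? key).or ((registro.find? (fun kv => pvNorm kv.1 == key)).map (·.2)) := by
  induction registro generalizing d with
  | nil => simp
  | cons kv rest ih =>
    simp only [List.foldl_cons, ih, List.find?_cons]
    by_cases hk : pvNorm kv.1 = key
    · subst hk
      by_cases hc : d.contains (pvNorm kv.1)
      · have hs : (d.get? (pvNorm kv.1)).isSome := by
          rw [← PySem.Dict.contains_eq_isSome_get?]; exact hc
        obtain ⟨w, hw⟩ := Option.isSome_iff_exists.mp hs
        simp [hc, hw]
      · have hn : d.get? (pvNorm kv.1) = none := by
          rw [PySem.Dict.get?_eq_none_iff_contains]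
          simpa using hc
        simp [hc, hn, PySem.Dict.get?_insert_self]
    · have hbeq : (pvNorm kv.1 == key) = false := by simpa using hk
      by_cases hc : d.contains (pvNorm kv.1)
      · simp [hc, hbeq]
      · simp [hc, hbeq, PySem.Dict.get?_insert_of_ne d kv.2 (Ne.symm hk)]

theorem pvCampo_eq_pvObter (registro : List (String × String)) (nome : String) :
    pvCampo (pvIndice registro) nome = pvObter registro nome := by
  unfold pvCampo pvIndice pvObter
  rw [pvIndice_fold_get?]
  simp

-- the index has no duplicate keys
theorem pvIndice_keys_nodup (registro : List (String × String)) :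
    (pvIndice registro).keys.Nodup := by
  unfold pvIndice
  suffices h : ∀ (l : List (String × String)) (d : PySem.Dict String String), d.keys.Nodup →
      (l.foldl (fun d kv => let n := pvNorm kv.1; if d.contains n then d else d.insert n kv.2) d).keys.Nodup by
    exact h registro PySem.Dict.empty (by simp [PySem.Dict.keys_empty])
  intro l
  induction l with
  | nil => intro d hd; simpa using hd
  | cons kv rest ih =>
    intro d hd
    simp only [List.foldl_cons]
    by_cases hc : d.contains (pvNorm kv.1) = true
    · rw [if_pos hc]
      exact ih d hd
    · have hkeys : (d.insert (pvNorm kv.1) kv.2).keys = d.keys ++ [pvNorm kv.1] := by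
        simp only [PySem.Dict.keys]
        rw [PySem.Dict.items_insert_of_not_contains d kv.2 (by simpa using hc)]
        simp
      have hnotmem : pvNorm kv.1 ∉ d.keys := by
        intro hmem
        apply hc
        rw [PySem.Dict.contains_eq_decide_mem_keys]
        simpa using hmem
      have hnd2 : (d.insert (pvNorm kv.1) kv.2).keys.Nodup := by
        rw [hkeys]
        rw [List.nodup_append]
        refine ⟨hd, List.nodup_singleton _, ?_⟩
        intro a ha b hb hab
        have hb' : b = pvNorm kv.1 := by simpa using hb
        exact hnotmem (hb' ▸ hab ▸ ha)
      rw [if_neg hc]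
      exact ih _ hnd2

-- B's filter condition agrees with A's ('t and t.strip()' vs 't.strip()')
theorem pv_filter_eq (t : String) :
    (!(t == "") && !(PySem.Str.strip t == "")) = (!(PySem.Str.strip t == "")) := by
  by_cases h : t = ""
  · subst h; decide
  · simp [h]

-- B's list comprehension computes exactly quebrar_tarefas on a present value
theorem pvTarefasB_eq_pvQuebrar (v : String) (limite : Int) :
    pvTarefasB v limite = pvQuebrar (some v) limite := by
  unfold pvTarefasB pvQuebrar
  by_cases hv : v = ""
  · subst hv
    have hflt : (((PySem.Str.split? "" ";").getD []).filter
        (fun t => !(PySem.Str.strip t == ""))) = [] := by decide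
    simp [hflt, PySem.List.slice]
  · have hfe : ((PySem.Str.split? v ";").getD []).filter (fun t => !(t == "") && !(PySem.Str.strip t == ""))
        = ((PySem.Str.split? v ";").getD []).filter (fun t => !(PySem.Str.strip t == "")) :=
      List.filter_congr (fun t _ => pv_filter_eq t)
    simp only [if_neg hv, hfe]

-- what one candidate name contributes, as a function of its normalized form
def pvH (indice : PySem.Dict String String) (limite : Int) (m : String) : Option (List String) :=
  (indice.get? m).bind (fun v =>
    let t := pvTarefasB v limite
    if t = [] then none else some t)

theorem pvH_eq (registro : List (String × String)) (limite : Int) (n : String) :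
    pvH (pvIndice registro) limite (pvNorm n)
    = (let t := pvQuebrar (pvObter registro n) limite; if t = [] then none else some t) := by
  have h : pvObter registro n = (pvIndice registro).get? (pvNorm n) := by
    rw [← pvCampo_eq_pvObter]; rfl
  rw [h]
  unfold pvH
  cases (pvIndice registro).get? (pvNorm n) with
  | none => simp [pvQuebrar]
  | some v =>
    simp only [pvTarefasB_eq_pvQuebrar]
    rfl

-- the rank of a normalized name: first index in the candidate list with that normalized form
def pvRho : List String → String → Option Nat
  | [], _ => none
  | n :: rest, m => if pvNorm n = m then some 0 else (pvRho rest m).map (· + 1)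

theorem pvRank_fold_get? (ns : List String) (m : String) :
    ∀ (k : Nat) (d : PySem.Dict String Nat),
    ((ns.zipIdx k).foldl (fun d ni => d.setdefault (pvNorm ni.1) ni.2) d).get? m
    = (d.get? m).or ((pvRho ns m).map (· + k)) := by
  induction ns with
  | nil => intro k d; simp [pvRho]
  | cons n rest ih =>
    intro k d
    rw [List.zipIdx_cons, List.foldl_cons, ih]
    by_cases hm : pvNorm n = m
    · subst hm
      rw [PySem.Dict.get?_setdefault_self]
      cases hd : d.get? (pvNorm n) with
      | none => simp [pvRho, hd]
      | some w => simp [pvRho, hd]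
    · rw [PySem.Dict.get?_setdefault_of_ne d k (Ne.symm hm)]
      simp only [pvRho, if_neg hm]
      cases pvRho rest m with
      | none => simp
      | some r => simp [Nat.add_assoc, Nat.add_comm 1 k]

theorem pvRank_get? (ns : List String) (m : String) :
    (pvRank ns).get? m = pvRho ns m := by
  unfold pvRank
  rw [pvRank_fold_get? ns m 0 PySem.Dict.empty]
  simp

-- the ranked, non-empty contributions of the record's fields
def pvG (itens : List (String × String)) (rho : String → Option Nat) (limite : Int) : List (Nat × List String) :=
  itens.filterMap (fun nv =>
    match rho nv.1 with
    | none => none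
    | some r =>
      let t := pvTarefasB nv.2 limite
      if t = [] then none else some (r, t))

-- first-strictly-smaller minimum fold over the contributions
def pvMinFold (G : List (Nat × List String)) (acc : Option (Nat × List String)) : Option (Nat × List String) :=
  G.foldl (fun b rt => match b with | none => some rt | some b0 => if rt.1 < b0.1 then some rt else some b0) acc

-- B's scan IS the minimum fold over the contributions
theorem pvVarredura_eq_minFold (rank : PySem.Dict String Nat) (limite : Int) (itens : List (String × String)) :
    pvVarredura rank limite itens
    = pvMinFold (pvG itens (fun m => rank.get? m) limite) none := by
  unfold pvVarredura
  suffices h : ∀ (l : List (String × String)) (acc : Option (Nat × List String)),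
      l.foldl (fun melhor nv =>
        match rank.get? nv.1 with
        | none => melhor
        | some r =>
          if (match melhor with | none => true | some b => decide (r < b.1)) then
            let tarefas := pvTarefasB nv.2 limite
            if tarefas = [] then melhor else some (r, tarefas)
          else melhor) acc
      = pvMinFold (pvG l (fun m => rank.get? m) limite) acc by
    exact h itens none
  intro l
  induction l with
  | nil => intro acc; simp [pvG, pvMinFold]
  | cons nv rest ih =>
    intro acc
    rw [List.foldl_cons]
    cases hr : rank.get? nv.1 with
    | none => simp only [pvG, List.filterMap_cons, hr]; exact ih acc
    | some r =>
      by_cases ht : pvTarefasB nv.2 limite = []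
      · simp only [pvG, List.filterMap_cons, hr, ht, if_pos rfl]
        cases acc with
        | none => simpa [pvG] using ih none
        | some b =>
          by_cases hlt : r < b.1
          · simpa [hlt, ht, pvG] using ih (some b)
          · simpa [hlt, pvG] using ih (some b)
      · simp only [pvG, List.filterMap_cons, hr, if_neg ht]
        cases acc with
        | none =>
          simp only [decide_eq_true_eq, if_pos]
          rw [ih]
          simp [pvMinFold, pvG]
        | some b =>
          by_cases hlt : r < b.1
          · simp only [hlt, decide_true, if_pos, if_neg ht]
            rw [ih]
            simp [pvMinFold, pvG, hlt]
          · simp only [hlt, decide_false]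
            rw [ih]
            simp [pvMinFold, pvG, hlt]

theorem pvMinFold_mem (G : List (Nat × List String)) :
    ∀ (acc : Option (Nat × List String)) (c : Nat × List String),
    pvMinFold G acc = some c → c ∈ G ∨ acc = some c := by
  induction G with
  | nil => intro acc c h; right; exact h
  | cons g rest ih =>
    intro acc c h
    unfold pvMinFold at h
    rw [List.foldl_cons] at h
    cases acc with
    | none =>
      rcases ih (some g) c h with h1 | h1
      · exact Or.inl (List.mem_cons_of_mem _ h1)
      · exact Or.inl (by injection h1 with h1; rw [← h1]; exact List.mem_cons_self)
    | some b0 =>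
      by_cases hlt : g.1 < b0.1
      · simp only [hlt, if_pos] at h
        rcases ih (some g) c h with h1 | h1
        · exact Or.inl (List.mem_cons_of_mem _ h1)
        · exact Or.inl (by injection h1 with h1; rw [← h1]; exact List.mem_cons_self)
      · simp only [hlt, if_neg] at h
        rcases ih (some b0) c h with h1 | h1
        · exact Or.inl (List.mem_cons_of_mem _ h1)
        · exact Or.inr h1

theorem pvMinFold_isSome (G : List (Nat × List String)) :
    ∀ (b : Nat × List String), ∃ c, pvMinFold G (some b) = some c := by
  induction G with
  | nil => intro b; exact ⟨b, rfl⟩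
  | cons g rest ih =>
    intro b
    unfold pvMinFold
    rw [List.foldl_cons]
    by_cases hlt : g.1 < b.1
    · simpa [hlt] using ih g
    · simpa [hlt] using ih b

theorem pvMapSnd_shift (o : Option (Nat × List String)) :
    (o.map (fun rt => (rt.1 + 1, rt.2))).map (fun x => x.2) = o.map (fun x => x.2) := by
  cases o <;> rfl

theorem pvMinFold_exists (G : List (Nat × List String)) (g : Nat × List String) (hg : g ∈ G) :
    ∃ c, pvMinFold G none = some c := by
  cases G with
  | nil => exact absurd hg (List.not_mem_nil)
  | cons g0 G' =>
    unfold pvMinFold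
    rw [List.foldl_cons]
    exact pvMinFold_isSome G' g0

theorem pvMinFold_le_acc (G : List (Nat × List String)) :
    ∀ (b c : Nat × List String), pvMinFold G (some b) = some c → c.1 ≤ b.1 := by
  induction G with
  | nil =>
    intro b c h
    simp only [pvMinFold, List.foldl_nil] at h
    injection h with h
    exact le_of_eq (congrArg Prod.fst h.symm)
  | cons g rest ih =>
    intro b c h
    unfold pvMinFold at h
    rw [List.foldl_cons] at h
    by_cases hlt : g.1 < b.1
    · simp only [hlt, if_pos] at h
      have := ih g c h
      omega
    · simp only [hlt, if_neg] at h
      exact ih b c h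

theorem pvMinFold_le_mem (G : List (Nat × List String)) :
    ∀ (acc : Option (Nat × List String)) (g c : Nat × List String),
    g ∈ G → pvMinFold G acc = some c → c.1 ≤ g.1 := by
  induction G with
  | nil => intro acc g c hg; exact absurd hg (List.not_mem_nil)
  | cons g0 rest ih =>
    intro acc g c hg h
    unfold pvMinFold at h
    rw [List.foldl_cons] at h
    rcases List.mem_cons.mp hg with hg1 | hg1
    · subst hg1
      cases acc with
      | none =>
        exact pvMinFold_le_acc rest g c h
      | some b0 =>
        by_cases hlt : g.1 < b0.1
        · simp only [hlt, if_pos] at h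
          exact pvMinFold_le_acc rest g c h
        · simp only [hlt, if_neg] at h
          have := pvMinFold_le_acc rest b0 c h
          omega
    · cases acc with
      | none => exact ih (some g0) g c hg1 h
      | some b0 =>
        by_cases hlt : g0.1 < b0.1
        · simp only [hlt, if_pos] at h; exact ih (some g0) g c hg1 h
        · simp only [hlt, if_neg] at h; exact ih (some b0) g c hg1 h

theorem pvMinFold_shift (G : List (Nat × List String)) :
    ∀ (acc : Option (Nat × List String)),
    pvMinFold (G.map (fun rt => (rt.1 + 1, rt.2))) (acc.map (fun rt => (rt.1 + 1, rt.2)))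
    = (pvMinFold G acc).map (fun rt => (rt.1 + 1, rt.2)) := by
  induction G with
  | nil => intro acc; simp [pvMinFold]
  | cons g rest ih =>
    intro acc
    unfold pvMinFold
    rw [List.map_cons, List.foldl_cons, List.foldl_cons]
    cases acc with
    | none =>
      have := ih (some g)
      simpa [pvMinFold] using this
    | some b0 =>
      by_cases hlt : g.1 < b0.1
      · have h1 : g.1 + 1 < b0.1 + 1 := by omega
        have := ih (some g)
        simpa [pvMinFold, hlt, h1] using this
      · have h1 : ¬ (g.1 + 1 < b0.1 + 1) := by omega
        have := ih (some b0)
        simpa [pvMinFold, hlt, h1] using this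

-- master: the one-pass minimum over ranked contributions equals the sequential first hit
set_option maxHeartbeats 800000 in
theorem pvMaster (indice : PySem.Dict String String) (hnd : indice.keys.Nodup) (limite : Int) :
    ∀ (ns : List String),
    (pvMinFold (pvG indice.items (pvRho ns) limite) none).map (·.2)
    = ns.findSome? (fun n => pvH indice limite (pvNorm n)) := by
  intro ns
  induction ns with
  | nil =>
    have hG : pvG indice.items (pvRho []) limite = [] := by
      simp [pvG, pvRho]
    rw [hG]
    simp [pvMinFold]
  | cons n rest ih =>
    rw [List.findSome?_cons]
    cases hh : pvH indice limite (pvNorm n) with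
    | none =>
      -- the head candidate contributes nothing: ranks shift by one
      have hshift : pvG indice.items (pvRho (n :: rest)) limite
          = (pvG indice.items (pvRho rest) limite).map (fun rt => (rt.1 + 1, rt.2)) := by
        unfold pvG
        rw [List.map_filterMap]
        apply List.filterMap_congr
        intro nv hnv
        have hget : indice.get? nv.1 = some nv.2 :=
          PySem.Dict.get?_of_mem_items indice hnv hnd
        by_cases hm : nv.1 = pvNorm n
        · -- this field IS the head candidate's field; pvH none forces empty tasks
          have hemp : pvTarefasB nv.2 limite = [] := by
            unfold pvH at hh
            rw [hm] at hget
            rw [hget] at hh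
            replace hh : (if pvTarefasB nv.2 limite = [] then none
                else some (pvTarefasB nv.2 limite)) = none := hh
            by_contra hne
            rw [if_neg hne] at hh
            simp at hh
          have hr1 : pvRho (n :: rest) nv.1 = some 0 := by
            rw [hm]
            show (if pvNorm n = pvNorm n then some 0
                else (pvRho rest (pvNorm n)).map (· + 1)) = some 0
            rw [if_pos rfl]
          rw [hr1, hemp]
          cases hr : pvRho rest nv.1 with
          | none => simp
          | some r => simp
        · have hm2 : pvNorm n ≠ nv.1 := fun h => hm h.symm
          have hr1 : pvRho (n :: rest) nv.1 = (pvRho rest nv.1).map (· + 1) := by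
            show (if pvNorm n = nv.1 then some 0
                else (pvRho rest nv.1).map (· + 1)) = (pvRho rest nv.1).map (· + 1)
            rw [if_neg hm2]
          rw [hr1]
          generalize pvTarefasB nv.2 limite = tv
          cases hr : pvRho rest nv.1 with
          | none => simp
          | some r =>
            by_cases ht : tv = []
            · simp [ht]
            · simp [ht]
      rw [hshift]
      have hsh2 := pvMinFold_shift (pvG indice.items (pvRho rest) limite) none
      simp only [Option.map_none] at hsh2
      rw [hsh2, ← ih]
      exact pvMapSnd_shift _
    | some t0 =>
      -- the head candidate hits: its field has rank 0, the unique minimum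
      obtain ⟨v0, hget, ht0v, ht0ne⟩ : ∃ v0, indice.get? (pvNorm n) = some v0 ∧
          pvTarefasB v0 limite = t0 ∧ t0 ≠ [] := by
        unfold pvH at hh
        cases hg : indice.get? (pvNorm n) with
        | none =>
          rw [hg] at hh
          replace hh : (none : Option (List String)) = some t0 := hh
          exact absurd hh (by simp)
        | some v =>
          rw [hg] at hh
          replace hh : (if pvTarefasB v limite = [] then none
              else some (pvTarefasB v limite)) = some t0 := hh
          by_cases ht : pvTarefasB v limite = []
          · rw [if_pos ht] at hh; exact absurd hh (by simp)
          · rw [if_neg ht] at hh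
            injection hh with hh
            exact ⟨v, rfl, hh, hh ▸ ht⟩
      have hmem : (pvNorm n, v0) ∈ indice.items := PySem.Dict.mem_items_of_get?_eq_some indice hget
      have hg0 : (0, t0) ∈ pvG indice.items (pvRho (n :: rest)) limite := by
        unfold pvG
        rw [List.mem_filterMap]
        refine ⟨(pvNorm n, v0), hmem, ?_⟩
        have hr1 : pvRho (n :: rest) (pvNorm n) = some 0 := by
          show (if pvNorm n = pvNorm n then some 0
              else (pvRho rest (pvNorm n)).map (· + 1)) = some 0
          rw [if_pos rfl]
        simp only [hr1]
        simp only [ht0v]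
        rw [if_neg ht0ne]
      obtain ⟨c, hc⟩ := pvMinFold_exists (pvG indice.items (pvRho (n :: rest)) limite) (0, t0) hg0
      have hc0 : c.1 = 0 :=
        Nat.le_zero.mp (pvMinFold_le_mem (pvG indice.items (pvRho (n :: rest)) limite) none (0, t0) c hg0 hc)
      have hcmem : c ∈ pvG indice.items (pvRho (n :: rest)) limite := by
        rcases pvMinFold_mem (pvG indice.items (pvRho (n :: rest)) limite) none c hc with h | h
        · exact h
        · exact absurd h (by simp)
      -- uniqueness of the rank-0 contribution
      have hcval : c = (0, t0) := by
        unfold pvG at hcmem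
        rw [List.mem_filterMap] at hcmem
        obtain ⟨nv, hnv, hfnv⟩ := hcmem
        generalize hgt : pvTarefasB nv.2 limite = tv at hfnv
        have hr0 : pvRho (n :: rest) nv.1 = some c.1 := by
          cases hr : pvRho (n :: rest) nv.1 with
          | none => rw [hr] at hfnv; simp at hfnv
          | some r =>
            simp only [hr] at hfnv
            by_cases ht : tv = []
            · simp [ht] at hfnv
            · simp [ht] at hfnv
              exact congrArg (fun p => some p.1) hfnv
        have hm : nv.1 = pvNorm n := by
          by_contra hm
          have hm2 : pvNorm n ≠ nv.1 := fun h => hm h.symm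
          have hsh : pvRho (n :: rest) nv.1 = (pvRho rest nv.1).map (· + 1) := by
            show (if pvNorm n = nv.1 then some 0
                else (pvRho rest nv.1).map (· + 1)) = (pvRho rest nv.1).map (· + 1)
            rw [if_neg hm2]
          rw [hsh, hc0] at hr0
          cases hr : pvRho rest nv.1 with
          | none => rw [hr] at hr0; simp at hr0
          | some r =>
            rw [hr] at hr0
            replace hr0 : some (r + 1) = some 0 := hr0
            injection hr0 with h
            omega
        have hget2 : indice.get? nv.1 = some nv.2 :=
          PySem.Dict.get?_of_mem_items indice hnv hnd
        have hv2 : nv.2 = v0 := by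
          rw [hm] at hget2
          exact Option.some.inj (hget2.symm.trans hget)
        have htv : tv = t0 := by
          rw [hv2] at hgt
          exact hgt.symm.trans ht0v
        have hr1 : pvRho (n :: rest) (pvNorm n) = some 0 := by
          show (if pvNorm n = pvNorm n then some 0
              else (pvRho rest (pvNorm n)).map (· + 1)) = some 0
          rw [if_pos rfl]
        rw [hm] at hfnv
        rw [hr1] at hfnv
        replace hfnv : (if tv = [] then none else some ((0 : Nat), tv)) = some c := hfnv
        rw [htv, if_neg ht0ne] at hfnv
        exact (Option.some.inj hfnv).symm
      rw [hc, hcval]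
      rfl

-- A's loops as findSome? (to line A up with the candidate list)
theorem pvLoopMapa_eq_findSome? (registro : List (String × String)) (limite : Int) (mapa : List (String × String)) :
    pvLoopMapa registro limite mapa
    = (mapa.map (·.2)).findSome? (fun n =>
        let t := pvQuebrar (pvObter registro n) limite
        if t = [] then none else some t) := by
  induction mapa with
  | nil => simp [pvLoopMapa]
  | cons kc rest ih =>
    simp only [pvLoopMapa, List.map_cons, List.findSome?_cons]
    by_cases ht : pvQuebrar (pvObter registro kc.2) limite = []
    · simp [ht, ih]
    · simp [ht]

theorem pvLoopFixo_eq_findSome? (registro : List (String × String)) (limite : Int) (names : List String) :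
    pvLoopFixo registro limite names
    = names.findSome? (fun n =>
        let t := pvQuebrar (pvObter registro n) limite
        if t = [] then none else some t) := by
  induction names with
  | nil => simp [pvLoopFixo]
  | cons n rest ih =>
    simp only [pvLoopFixo, List.findSome?_cons]
    by_cases ht : pvQuebrar (pvObter registro n) limite = []
    · simp [ht, ih]
    · simp [ht]

-- B's whole pipeline over a candidate list, phrased with A's lookup
theorem pvB_pipeline (registro : List (String × String)) (limite : Int) (ns : List String) :
    (match pvVarredura (pvRank ns) limite (pvIndice registro).items with
     | some rt => rt.2
     | none => [])
    = (ns.findSome? (fun n =>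
        let t := pvQuebrar (pvObter registro n) limite
        if t = [] then none else some t)).getD [] := by
  rw [pvVarredura_eq_minFold]
  have hrho : (fun m => (pvRank ns).get? m) = pvRho ns := funext (pvRank_get? ns)
  rw [hrho]
  have hmaster := pvMaster (pvIndice registro) (pvIndice_keys_nodup registro) limite ns
  have hfun : (fun n => pvH (pvIndice registro) limite (pvNorm n))
      = (fun n => let t := pvQuebrar (pvObter registro n) limite; if t = [] then none else some t) :=
    funext (fun n => pvH_eq registro limite n)
  rw [hfun] at hmaster
  rw [← hmaster]
  cases pvMinFold (pvG (pvIndice registro).items (pvRho ns) limite) none with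
  | none => simp
  | some c => simp

-- ===== VERDICT (by name: the statement is the Claim_ definition above) =====
theorem extrair_tarefas_spec : Claim_equal_extrair_tarefas := by
  intro registro mapa_etapas limite _
  unfold Spec_extrair_tarefas
  simp only [extrair_tarefas, extrair_tarefas_alt, pvDescobrir]
  simp only [pvCampo_eq_pvObter]
  rw [pvB_pipeline]
  simp only [List.findSome?_append]
  rw [pvLoopMapa_eq_findSome?, pvLoopFixo_eq_findSome?]
  generalize PySem.Str.strip (pvOrStr (pvObter registro "etapa") (pvOrStr (pvObter registro "etapa_da_obra") "")) = etapa
  generalize (if etapa = "" then (none : Option String)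
      else (mapa_etapas.find? (fun kc => pvNorm kc.1 == pvNorm etapa || pvNorm kc.2 == pvNorm etapa)).map (·.2)) = coluna
  generalize h2 : List.findSome? (fun n =>
      let t := pvQuebrar (pvObter registro n) limite
      if t = [] then none else some t) (mapa_etapas.map (·.2)) = o2
  generalize h3 : List.findSome? (fun n =>
      let t := pvQuebrar (pvObter registro n) limite
      if t = [] then none else some t) ["tarefas", "tarefas_realizadas", "atividade", "atividades"] = o3
  cases coluna with
  | none =>
    simp only [List.findSome?_nil, Option.none_or]
    cases o2 <;> cases o3 <;> rfl
  | some c =>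
    by_cases hce : c = ""
    · subst hce
      cases o2 <;> cases o3 <;> rfl
    · simp only [if_neg hce, List.findSome?_cons, List.findSome?_nil]
      generalize pvQuebrar (pvObter registro c) limite = t
      by_cases ht : t = []
      · simp only [if_pos ht, Option.none_or]
        cases o2 <;> cases o3 <;> rfl
      · simp only [if_neg ht]
        rfl
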